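-- pv_equiv track=rewrite | github.com/Dajaalmie/Chapter_Two | ScholarGpt_fixed.py | choose_three_citations
-- ===== SOURCE A (Python) =====
-- from typing import Dict, List, Optional
--
-- def choose_three_citations(documents: List[Dict], search_results: List[Dict]) -> List[str]:
--     labels: List[str] = []
--     for source in documents + search_results:
--         label = source.get("citation_label")
--         if label and label not in labels:
--             labels.append(label)
--     if not labels:
--         return []
--     if len(labels) == 1:
--         return [labels[0], labels[0], labels[0]]
--     if len(labels) == 2:
--         return [labels[0], labels[1], labels[0]]
--     return labels[:3]
-- ===== SOURCE B (Python) =====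
-- from typing import Dict, List
--
-- def choose_three_citations(documents: List[Dict], search_results: List[Dict]) -> List[str]:
--     # Early-exit scan keeping at most three label slots; stops as soon as a
--     # third distinct label is seen, never materialising the full label list.
--     a = b = None
--     for source in documents + search_results:
--         label = source.get("citation_label")
--         if not label or label == a or label == b:
--             continue
--         if a is None:
--             a = label
--         elif b is None:
--             b = label
--         else:
--             return [a, b, label]
--     if a is None:
--         return []
--     if b is None:
--         return [a, a, a]
--     return [a, b, a]
-- ===== Notes on version B (the rewrite author's own statement) =====
-- stated objective: alternative
-- what changed: Instead of accumulating the full de-duplicated label list and then branching on its length, B keeps only two fixed label slots, returns [a,b,label] immediately (early exit) the moment a third distinct label appears, and pads from the slots at the end; no label list is ever built.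
import Mathlib
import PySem

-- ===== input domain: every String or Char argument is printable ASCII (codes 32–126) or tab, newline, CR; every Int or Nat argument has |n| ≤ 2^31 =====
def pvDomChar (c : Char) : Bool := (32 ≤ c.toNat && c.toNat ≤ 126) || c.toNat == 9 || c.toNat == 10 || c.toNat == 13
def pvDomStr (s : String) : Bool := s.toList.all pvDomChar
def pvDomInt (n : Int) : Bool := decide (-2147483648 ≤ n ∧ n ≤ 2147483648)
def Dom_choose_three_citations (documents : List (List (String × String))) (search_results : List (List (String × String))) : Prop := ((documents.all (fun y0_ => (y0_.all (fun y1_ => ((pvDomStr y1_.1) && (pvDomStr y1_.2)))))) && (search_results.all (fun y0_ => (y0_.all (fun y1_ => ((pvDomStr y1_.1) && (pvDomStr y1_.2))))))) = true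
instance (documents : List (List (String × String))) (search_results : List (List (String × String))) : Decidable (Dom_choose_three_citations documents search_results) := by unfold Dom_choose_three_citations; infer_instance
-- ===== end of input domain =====

-- B replaces A's collect-all-distinct-labels-then-branch-on-length by a constant-space
-- early-exit scan holding at most two label slots (objective: alternative).

-- ===== PORT A =====
-- labels loop: for source in documents + search_results: label = source.get("citation_label");
-- if label and label not in labels: labels.append(label); then the len-based branch cascade.
def choose_three_citations (documents : List (List (String × String))) (search_results : List (List (String × String))) : List String :=
  let labels : List String :=
    (documents ++ search_results).foldl
      (fun labels source =>
        match PySem.Dict.get? (PySem.Dict.mk source) "citation_label" with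
        | some label => if label ≠ "" ∧ label ∉ labels then labels ++ [label] else labels
        | none => labels)
      []
  if labels = [] then []
  else if labels.length = 1 then
    [PySem.List.pyGetD labels 0 "", PySem.List.pyGetD labels 0 "", PySem.List.pyGetD labels 0 ""]
  else if labels.length = 2 then
    [PySem.List.pyGetD labels 0 "", PySem.List.pyGetD labels 1 "", PySem.List.pyGetD labels 0 ""]
  else PySem.List.slice labels none (some 3)

-- ===== PORT B =====
-- the for-loop with slots a, b and the early 'return [a, b, label]' becomes structural
-- recursion over the remaining sources; the trailing pad branches are the base case.
def pvScan3 (xs : List (List (String × String))) (a? b? : Option String) : List String :=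
  match xs with
  | [] =>
    match a?, b? with
    | none, _ => []
    | some a, none => [a, a, a]
    | some a, some b => [a, b, a]
  | src :: rest =>
    match PySem.Dict.get? (PySem.Dict.mk src) "citation_label" with
    | none => pvScan3 rest a? b?
    | some label =>
      if label = "" ∨ some label = a? ∨ some label = b? then pvScan3 rest a? b?
      else
        match a?, b? with
        | none, _ => pvScan3 rest (some label) b?
        | some _, none => pvScan3 rest a? (some label)
        | some a, some b => [a, b, label]

def choose_three_citations_alt (documents : List (List (String × String))) (search_results : List (List (String × String))) : List String :=
  pvScan3 (documents ++ search_results) none none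

-- ===== PRECONDITION & SPEC =====
def Spec_choose_three_citations (documents : List (List (String × String))) (search_results : List (List (String × String))) (out : List String) : Prop := out = choose_three_citations_alt documents search_results
instance (documents : List (List (String × String))) (search_results : List (List (String × String))) (out : List String) : Decidable (Spec_choose_three_citations documents search_results out) := by unfold Spec_choose_three_citations; infer_instance

-- ===== CLAIM (what is proved, stated in full; the proofs are below) =====
def Claim_equal_choose_three_citations : Prop := ∀ (documents : List (List (String × String))) (search_results : List (List (String × String))), Dom_choose_three_citations documents search_results → Spec_choose_three_citations documents search_results (choose_three_citations documents search_results)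

-- ===== LEMMAS AND PROOFS =====

-- abbreviations for A's two stages, used only in the proofs
def pvStep (labels : List String) (source : List (String × String)) : List String :=
  match PySem.Dict.get? (PySem.Dict.mk source) "citation_label" with
  | some label => if label ≠ "" ∧ label ∉ labels then labels ++ [label] else labels
  | none => labels

def pvFinish (labels : List String) : List String :=
  if labels = [] then []
  else if labels.length = 1 then
    [PySem.List.pyGetD labels 0 "", PySem.List.pyGetD labels 0 "", PySem.List.pyGetD labels 0 ""]
  else if labels.length = 2 then
    [PySem.List.pyGetD labels 0 "", PySem.List.pyGetD labels 1 "", PySem.List.pyGetD labels 0 ""]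
  else PySem.List.slice labels none (some 3)

theorem step_prefix (acc : List String) (s : List (String × String)) :
    ∃ u, pvStep acc s = acc ++ u := by
  unfold pvStep
  cases PySem.Dict.get? (PySem.Dict.mk s) "citation_label" with
  | none => exact ⟨[], by simp⟩
  | some l =>
    by_cases h : l ≠ "" ∧ l ∉ acc
    · exact ⟨[l], by simp [h]⟩
    · exact ⟨[], by simp [h]⟩

theorem fold_prefix (xs : List (List (String × String))) :
    ∀ acc, ∃ t, xs.foldl pvStep acc = acc ++ t := by
  induction xs with
  | nil => intro acc; exact ⟨[], by simp⟩
  | cons s rest ih =>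
    intro acc
    obtain ⟨u, hu⟩ := step_prefix acc s
    obtain ⟨t, ht⟩ := ih (acc ++ u)
    exact ⟨u ++ t, by rw [List.foldl_cons, hu, ht, List.append_assoc]⟩

theorem finish_long (a b c : String) (t : List String) :
    pvFinish (a :: b :: c :: t) = [a, b, c] := by
  unfold pvFinish
  rw [if_neg (by simp), if_neg (by simp), if_neg (by simp)]
  rw [show ((3 : Int)) = ((3 : Nat) : Int) from rfl, PySem.List.slice_to_natCast]
  rfl

theorem scan_eq (xs : List (List (String × String))) :
    ∀ (a? b? : Option String) (acc : List String),
      ((a? = none ∧ b? = none ∧ acc = []) ∨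
       (∃ a, a? = some a ∧ b? = none ∧ acc = [a]) ∨
       (∃ a b, a? = some a ∧ b? = some b ∧ a ≠ b ∧ acc = [a, b])) →
      pvScan3 xs a? b? = pvFinish (xs.foldl pvStep acc) := by
  induction xs with
  | nil =>
    intro a? b? acc h
    rcases h with ⟨ha, hb, hacc⟩ | ⟨a, ha, hb, hacc⟩ | ⟨a, b, ha, hb, _, hacc⟩ <;>
      subst ha <;> subst hb <;> subst hacc <;>
      simp [pvScan3, pvFinish, PySem.List.pyGetD, PySem.List.pyGet?, PySem.List.pyIdx?]
  | cons src rest ih =>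
    intro a? b? acc h
    rw [List.foldl_cons]
    cases hg : PySem.Dict.get? (PySem.Dict.mk src) "citation_label" with
    | none =>
      have hs : pvStep acc src = acc := by unfold pvStep; rw [hg]
      rw [hs]
      simp only [pvScan3, hg]
      exact ih a? b? acc h
    | some l =>
      have hs : pvStep acc src = if l ≠ "" ∧ l ∉ acc then acc ++ [l] else acc := by
        unfold pvStep; rw [hg]
      rw [hs]
      rcases h with ⟨ha, hb, hacc⟩ | ⟨a, ha, hb, hacc⟩ | ⟨a, b, ha, hb, hab, hacc⟩
      · subst ha; subst hb; subst hacc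
        by_cases hl : l = ""
        · rw [if_neg (by simp [hl])]
          simp only [pvScan3, hg]
          rw [if_pos (Or.inl hl)]
          exact ih none none [] (Or.inl ⟨rfl, rfl, rfl⟩)
        · rw [if_pos ⟨hl, by simp⟩]
          simp only [pvScan3, hg]
          rw [if_neg (by simp [hl])]
          exact ih (some l) none [l] (Or.inr (Or.inl ⟨l, rfl, rfl, rfl⟩))
      · subst ha; subst hb; subst hacc
        by_cases hl : l = "" ∨ l = a
        · rw [if_neg (by rcases hl with h | h <;> simp [h])]
          simp only [pvScan3, hg]
          rw [if_pos (by rcases hl with h | h <;> simp [h])]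
          exact ih (some a) none [a] (Or.inr (Or.inl ⟨a, rfl, rfl, rfl⟩))
        · push Not at hl
          obtain ⟨hl1, hl2⟩ := hl
          rw [if_pos ⟨hl1, by simp [hl2]⟩]
          simp only [pvScan3, hg]
          rw [if_neg (by simp [hl1, hl2])]
          exact ih (some a) (some l) [a, l]
            (Or.inr (Or.inr ⟨a, l, rfl, rfl, fun e => hl2 e.symm, rfl⟩))
      · subst ha; subst hb; subst hacc
        by_cases hl : l = "" ∨ l = a ∨ l = b
        · rw [if_neg (by rcases hl with h | h | h <;> simp [h])]
          simp only [pvScan3, hg]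
          rw [if_pos (by rcases hl with h | h | h <;> simp [h])]
          exact ih (some a) (some b) [a, b] (Or.inr (Or.inr ⟨a, b, rfl, rfl, hab, rfl⟩))
        · push Not at hl
          obtain ⟨hl1, hl2, hl3⟩ := hl
          rw [if_pos ⟨hl1, by simp [hl2, hl3]⟩]
          simp only [pvScan3, hg]
          rw [if_neg (by simp [hl1, hl2, hl3])]
          obtain ⟨t, ht⟩ := fold_prefix rest ([a, b] ++ [l])
          rw [ht]
          exact (finish_long a b l t).symm

-- ===== VERDICT (by name: the statement is the Claim_ definition above) =====
theorem choose_three_citations_spec : Claim_equal_choose_three_citations := by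
  intro documents search_results _
  unfold Spec_choose_three_citations choose_three_citations_alt
  show (choose_three_citations documents search_results) = _
  unfold choose_three_citations
  rw [scan_eq (documents ++ search_results) none none [] (Or.inl ⟨rfl, rfl, rfl⟩)]
  rfl
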